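-- pv_equiv track=rewrite | github.com/JoseCarlos458/swirlSearch | swirl/processors/utils.py | capitalize_search
-- ===== SOURCE A (Python) =====
-- def match_all(list_find, list_targets):
--
--     match_list = []
--     if not list_targets:
--         return match_list
--
--     if not list_find:
--         return match_list
--
--     find = ' '.join(list_find).lower()
--
--     p = 0
--     while p < len(list_targets):
--         if find in ' '.join(list_targets[p:p+len(list_find)]).lower():
--             match_list.append(p)
--         p = p + 1
--
--     return match_list
--
-- def capitalize_search(list_lower, list_unknown):
--     """
--
--     """
--
--     if type(list_lower) != list:
--         return None
--
--     if type(list_unknown) != list: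
--         return None
--
--     if not list_lower:
--         return list_lower
--
--     if not list_unknown:
--         return list_unknown
--
--     list_capitalized = []
--     for i in list_lower:
--         loc_list = match_all([i], list_unknown)
--         capped = False
--         for loc in loc_list:
--             if list_unknown[loc][0].isupper():
--                 list_capitalized.append(i[0].upper() + i[1:])
--                 capped = True
--                 break
--         if capped:
--             continue
--         list_capitalized.append(i)
--     # end for
--
--     return list_capitalized
-- ===== SOURCE B (Python) =====
-- def capitalize_search(list_lower, list_unknown):
--     if type(list_lower) != list:
--         return None
--     if type(list_unknown) != list:
--         return None
--     if not list_lower: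
--         return list_lower
--     if not list_unknown:
--         return list_unknown
--     # pre-lower the uppercase-initial unknown tokens once
--     cands = [u.lower() for u in list_unknown if u[:1].isupper()]
--     return [i[:1].upper() + i[1:] if any(i.lower() in c for c in cands) else i
--             for i in list_lower]
-- ===== Notes on version B (the rewrite author's own statement) =====
-- stated objective: simpler
-- what changed: Inlines match_all away: instead of building a full index list of matching positions per word and re-scanning it with a break flag, B pre-filters and pre-lowers the uppercase-initial unknown tokens once and maps each word through a short-circuiting any() substring test.
import Mathlib
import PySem

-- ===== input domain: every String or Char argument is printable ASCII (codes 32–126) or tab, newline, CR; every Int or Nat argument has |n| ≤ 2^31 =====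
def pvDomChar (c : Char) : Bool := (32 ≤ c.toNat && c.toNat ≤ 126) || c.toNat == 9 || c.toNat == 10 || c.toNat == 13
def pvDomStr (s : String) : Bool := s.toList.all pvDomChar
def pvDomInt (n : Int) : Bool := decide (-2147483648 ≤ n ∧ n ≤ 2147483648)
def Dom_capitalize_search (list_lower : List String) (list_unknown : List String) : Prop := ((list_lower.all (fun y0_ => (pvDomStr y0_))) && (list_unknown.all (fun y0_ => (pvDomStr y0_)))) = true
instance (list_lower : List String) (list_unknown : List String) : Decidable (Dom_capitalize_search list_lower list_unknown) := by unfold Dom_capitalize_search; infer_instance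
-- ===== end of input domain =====

-- B inlines match_all away: it pre-filters/pre-lowers the uppercase-initial unknown tokens once and
-- maps each word through a short-circuiting substring test (objective: simpler). Return value only; no mutation.

-- ===== PORT A =====
-- helper match_all of A (strings handled on List Char via PySem.Chars; exact on the ASCII domain)
def match_all (list_find : List String) (list_targets : List String) : List Int :=
  if list_targets = [] then []
  else if list_find = [] then []
  else
    let find := PySem.Chars.lower (PySem.Chars.join [' '] (list_find.map String.toList))
    (PySem.List.pyRange 0 (list_targets.length : Int) 1).foldl
      (fun ml p =>
        if PySem.Chars.isIn find
            (PySem.Chars.lower (PySem.Chars.join [' ']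
              ((PySem.List.slice list_targets (some p) (some (p + (list_find.length : Int)))).map String.toList)))
        then ml ++ [p] else ml) []

-- A's inner 'for loc in loc_list: if list_unknown[loc][0].isupper(): …; break' loop, returning 'capped'
def capLoopA (list_unknown : List String) : List Int → Bool
  | [] => false
  | loc :: rest =>
    match PySem.List.pyGet? list_unknown loc with
    | none => capLoopA list_unknown rest          -- unreachable: match_all only yields in-range indices
    | some u =>
      match u.toList with
      | [] => capLoopA list_unknown rest          -- Python raises IndexError (u[0]) here; excluded by Pre_
      | c :: _ => if PySem.Chars.isupper c then true else capLoopA list_unknown rest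

-- A's 'i[0].upper() + i[1:]' (only evaluated when capped)
def capWordA (i : String) : String :=
  match i.toList with
  | [] => i                                       -- Python raises IndexError (i[0]) here; excluded by Pre_
  | c :: rest => String.ofList (PySem.Chars.upperChar c :: rest)

def capitalize_search (list_lower : List String) (list_unknown : List String) : List String :=
  if list_lower = [] then list_lower
  else if list_unknown = [] then list_unknown
  else
    list_lower.foldl (fun acc i =>
      if capLoopA list_unknown (match_all [i] list_unknown)
      then acc ++ [capWordA i] else acc ++ [i]) []

-- ===== PORT B =====
-- 'u[:1].isupper()' (exact on ASCII: empty slice is not upper; single char tests the char)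
def firstUpperB (u : String) : Bool :=
  match u.toList with
  | [] => false
  | c :: _ => PySem.Chars.isupper c

-- 'i[:1].upper() + i[1:]' (exact on ASCII; identity on the empty string)
def capWordB (i : String) : String :=
  String.ofList (PySem.Chars.upper (PySem.Chars.slice i.toList (some 0) (some 1)) ++
    PySem.Chars.slice i.toList (some 1) none)

def capitalize_search_alt (list_lower : List String) (list_unknown : List String) : List String :=
  if list_lower = [] then list_lower
  else if list_unknown = [] then list_unknown
  else
    let cands := (list_unknown.filter firstUpperB).map (fun u => PySem.Chars.lower u.toList)
    list_lower.map (fun i =>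
      if cands.any (fun c => PySem.Chars.isIn (PySem.Chars.lower i.toList) c)
      then capWordB i else i)

-- ===== PRECONDITION & SPEC =====
-- Pre_ excludes exactly the inputs where Python A raises IndexError: '' in list_lower together with an
-- empty or uppercase-initial token in list_unknown (then s[0] is taken on an empty word or token).
def Pre_capitalize_search (list_lower : List String) (list_unknown : List String) : Prop :=
  "" ∈ list_lower →
    (list_unknown.all (fun u =>
      match u.toList with
      | [] => false
      | c :: _ => !PySem.Chars.isupper c)) = true
instance (list_lower : List String) (list_unknown : List String) : Decidable (Pre_capitalize_search list_lower list_unknown) := by unfold Pre_capitalize_search; infer_instance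
def pvWitness_capitalize_search : List String × List String := (["foo", "bar"], ["Food", "xbarx"])

def Spec_capitalize_search (list_lower : List String) (list_unknown : List String) (out : List String) : Prop := out = capitalize_search_alt list_lower list_unknown
instance (list_lower : List String) (list_unknown : List String) (out : List String) : Decidable (Spec_capitalize_search list_lower list_unknown out) := by unfold Spec_capitalize_search; infer_instance

-- ===== CLAIM (what is proved, stated in full; the proofs are below) =====
def Claim_equal_capitalize_search : Prop := ∀ (list_lower : List String) (list_unknown : List String), Dom_capitalize_search list_lower list_unknown → Pre_capitalize_search list_lower list_unknown → Spec_capitalize_search list_lower list_unknown (capitalize_search list_lower list_unknown)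


-- ===== LEMMAS AND PROOFS =====

-- membership in match_all [i] lu: exactly the in-range positions whose token contains i case-insensitively
theorem mem_match_all (i : String) (lu : List String) (hne : lu ≠ []) (p : Int) :
    p ∈ match_all [i] lu ↔
      ∃ n : Nat, ∃ u : String, lu[n]? = some u ∧ p = (n : Int) ∧
        PySem.Chars.isIn (PySem.Chars.lower i.toList) (PySem.Chars.lower u.toList) = true := by
  have hi : ([i] : List String) ≠ [] := by simp
  unfold match_all
  rw [if_neg hne, if_neg hi]
  simp only [List.map, PySem.Chars.join_singleton, List.length_singleton, Nat.cast_one]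
  rw [PySem.List.foldl_append_if_eq_filter, List.nil_append, List.mem_filter,
    PySem.List.mem_pyRange_one]
  constructor
  · rintro ⟨⟨h0, hlt⟩, hP⟩
    have hn : p.toNat < lu.length := by omega
    refine ⟨p.toNat, lu[p.toNat], List.getElem?_eq_getElem hn, by omega, ?_⟩
    have hslice : PySem.List.slice lu (some p) (some (p + 1)) = [lu[p.toNat]] := by
      rw [PySem.List.slice_toNat lu h0 (by omega)]
      have ht : (p + 1).toNat - p.toNat = 1 := by omega
      rw [ht, List.drop_eq_getElem_cons hn]
      rfl
    rw [hslice] at hP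
    simpa [PySem.Chars.join_singleton] using hP
  · rintro ⟨n, u, hget, rfl, hin⟩
    have hn : n < lu.length := by
      by_contra h
      rw [List.getElem?_eq_none (by omega)] at hget
      cases hget
    have hu : lu[n] = u := by
      rw [List.getElem?_eq_getElem hn] at hget
      exact Option.some.inj hget
    refine ⟨⟨by omega, by exact_mod_cast hn⟩, ?_⟩
    have hslice : PySem.List.slice lu (some (n : Int)) (some ((n : Int) + 1)) = [u] := by
      rw [PySem.List.slice_toNat lu (by omega) (by omega)]
      have ht : ((n : Int) + 1).toNat - (n : Int).toNat = 1 := by omega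
      have h2 : (n : Int).toNat = n := by omega
      rw [ht, h2, List.drop_eq_getElem_cons hn, hu]
      rfl
    rw [hslice]
    simpa [PySem.Chars.join_singleton] using hin

-- A's break-loop is an any over the index list
theorem capLoopA_eq_any (lu : List String) (locs : List Int) :
    capLoopA lu locs = locs.any (fun loc =>
      match PySem.List.pyGet? lu loc with
      | none => false
      | some u => firstUpperB u) := by
  induction locs with
  | nil => rfl
  | cons loc rest ih =>
    simp only [capLoopA, List.any_cons]
    cases hget : PySem.List.pyGet? lu loc with
    | none => simp [ih]
    | some u =>
      cases hc : u.toList with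
      | nil => simp [firstUpperB, hc, ih]
      | cons c cs =>
        cases hup : PySem.Chars.isupper c <;> simp [firstUpperB, hc, hup, ih]

-- the per-word conditions of the two ports coincide
theorem cond_eq (i : String) (lu : List String) (hne : lu ≠ []) :
    capLoopA lu (match_all [i] lu) =
      ((lu.filter firstUpperB).map (fun u => PySem.Chars.lower u.toList)).any
        (fun c => PySem.Chars.isIn (PySem.Chars.lower i.toList) c) := by
  rw [capLoopA_eq_any]
  apply Bool.eq_iff_iff.mpr
  simp only [List.any_eq_true, List.mem_map, List.mem_filter]
  constructor
  · rintro ⟨loc, hmem, hup⟩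
    obtain ⟨n, u, hget, rfl, hin⟩ := (mem_match_all i lu hne loc).mp hmem
    rw [PySem.List.pyGet?_natCast, hget] at hup
    exact ⟨PySem.Chars.lower u.toList, ⟨u, ⟨List.mem_of_getElem? hget, hup⟩, rfl⟩, hin⟩
  · rintro ⟨c, ⟨u, ⟨hmemu, hup⟩, rfl⟩, hin⟩
    obtain ⟨n, hn, hu⟩ := List.getElem_of_mem hmemu
    refine ⟨(n : Int), (mem_match_all i lu hne _).mpr ⟨n, u, ?_, rfl, by rw [← hu] at hin ⊢; exact hin⟩, ?_⟩
    · rw [List.getElem?_eq_getElem hn, hu]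
    · rw [PySem.List.pyGet?_natCast, List.getElem?_eq_getElem hn, hu]
      exact hup

theorem capWordA_eq_capWordB (i : String) : capWordA i = capWordB i := by
  unfold capWordA capWordB
  cases hc : i.toList with
  | nil =>
    have hi : i = "" := by
      have := congrArg String.ofList hc
      simpa using this
    subst hi
    decide
  | cons c cs =>
    have hi : i = String.ofList (c :: cs) := by
      have := congrArg String.ofList hc
      simpa using this
    subst hi
    simp only [String.toList_ofList, PySem.Chars.slice_eq_listSlice]
    rw [PySem.List.slice_from _ (by norm_num), PySem.List.slice_toNat _ (by norm_num) (by norm_num)]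
    simp [PySem.Chars.upper]

-- ===== VERDICT (by name: the statement is the Claim_ definition above) =====
theorem capitalize_search_spec : Claim_equal_capitalize_search := by
  intro ll lu _ _
  unfold Spec_capitalize_search capitalize_search capitalize_search_alt
  by_cases h1 : ll = []
  · simp [h1]
  · by_cases h2 : lu = []
    · simp [h2]
    · simp only [h1, h2, reduceIte]
      have hbody : ∀ (acc : List String) (i : String),
          (if capLoopA lu (match_all [i] lu) then acc ++ [capWordA i] else acc ++ [i]) =
            acc ++ [if capLoopA lu (match_all [i] lu) then capWordA i else i] := by
        intro acc i; split <;> rfl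
      calc ll.foldl (fun acc i =>
              if capLoopA lu (match_all [i] lu) then acc ++ [capWordA i] else acc ++ [i]) []
          = ll.foldl (fun acc i =>
              acc ++ [if capLoopA lu (match_all [i] lu) then capWordA i else i]) [] := by
            congr 1; funext acc i; exact hbody acc i
        _ = ll.map (fun i => if capLoopA lu (match_all [i] lu) then capWordA i else i) := by
            rw [PySem.List.foldl_append_singleton_eq_map]; rfl
        _ = _ := by
            apply List.map_congr_left
            intro i _
            rw [cond_eq i lu h2, capWordA_eq_capWordB]
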